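-- pv_equiv track=rewrite | github.com/Irfhan-04/LLM_Engineer_Assignment | llm_eval_pipeline_cg/utils.py | extract_latest_turn
-- ===== SOURCE A (Python) =====
-- def extract_latest_turn(conversation: dict):
--     messages = conversation.get("messages", [])
--     user, assistant = "", ""
--
--     for msg in reversed(messages):
--         if msg.get("role") == "assistant" and not assistant:
--             assistant = msg.get("content", "")
--         elif msg.get("role") == "user" and not user:
--             user = msg.get("content", "")
--         if user and assistant:
--             break
--
--     return user, assistant
-- ===== SOURCE B (Python) =====
-- def extract_latest_turn(conversation: dict):
--     messages = conversation.get("messages", [])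
--
--     def latest(role):
--         return next((m.get("content", "") for m in reversed(messages)
--                      if m.get("role") == role and m.get("content", "")), "")
--
--     return latest("user"), latest("assistant")
-- ===== Notes on version B (the rewrite author's own statement) =====
-- stated objective: idiomatic
-- what changed: Replaces the interleaved reverse scan with mutable user/assistant state and a break by two independent role-specific searches using next() over reversed(messages), defaulting to ''.
import Mathlib
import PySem

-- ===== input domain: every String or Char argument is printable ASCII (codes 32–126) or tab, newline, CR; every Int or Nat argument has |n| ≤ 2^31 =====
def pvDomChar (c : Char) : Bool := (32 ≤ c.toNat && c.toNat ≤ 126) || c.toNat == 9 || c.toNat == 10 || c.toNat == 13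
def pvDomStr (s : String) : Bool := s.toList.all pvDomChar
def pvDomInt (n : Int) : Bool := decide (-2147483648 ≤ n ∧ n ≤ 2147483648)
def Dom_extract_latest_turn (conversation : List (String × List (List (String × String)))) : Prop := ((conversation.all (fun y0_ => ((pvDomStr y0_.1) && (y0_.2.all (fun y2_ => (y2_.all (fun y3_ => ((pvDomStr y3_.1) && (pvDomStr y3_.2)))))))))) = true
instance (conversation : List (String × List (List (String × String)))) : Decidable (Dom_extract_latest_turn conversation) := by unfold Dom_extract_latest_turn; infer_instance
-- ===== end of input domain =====

-- B replaces A's single interleaved reverse scan with mutable state and a break by two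
-- independent role-specific searches (next over reversed(messages), default ""): idiomatic.

-- ===== PORT A =====
-- the for-loop over reversed(messages) with mutable user/assistant and the break
def pvLoopA : List (List (String × String)) → String → String → String × String
  | [], user, assistant => (user, assistant)
  | msg :: rest, user, assistant =>
    let st :=
      if (PySem.Dict.mk msg).get? "role" == some "assistant" && assistant == "" then
        (user, (PySem.Dict.mk msg).getD "content" "")
      else if (PySem.Dict.mk msg).get? "role" == some "user" && user == "" then
        ((PySem.Dict.mk msg).getD "content" "", assistant)
      else (user, assistant)
    if st.1 != "" && st.2 != "" then st
    else pvLoopA rest st.1 st.2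

def extract_latest_turn (conversation : List (String × List (List (String × String)))) : String × String :=
  let messages := (PySem.Dict.mk conversation).getD "messages" []
  pvLoopA messages.reverse "" ""

-- ===== PORT B =====
-- next((m.get("content","") for m in reversed(messages) if m.get("role") == role and m.get("content","")), "")
def pvLatest (messages : List (List (String × String))) (role : String) : String :=
  match messages.reverse.find? (fun m =>
      (PySem.Dict.mk m).get? "role" == some role && !((PySem.Dict.mk m).getD "content" "" == "")) with
  | some m => (PySem.Dict.mk m).getD "content" ""
  | none => ""

def extract_latest_turn_alt (conversation : List (String × List (List (String × String)))) : String × String :=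
  let messages := (PySem.Dict.mk conversation).getD "messages" []
  (pvLatest messages "user", pvLatest messages "assistant")

-- ===== PRECONDITION & SPEC =====
def Spec_extract_latest_turn (conversation : List (String × List (List (String × String)))) (out : String × String) : Prop := out = extract_latest_turn_alt conversation
instance (conversation : List (String × List (List (String × String)))) (out : String × String) : Decidable (Spec_extract_latest_turn conversation out) := by unfold Spec_extract_latest_turn; infer_instance

-- ===== CLAIM (what is proved, stated in full; the proofs are below) =====
def Claim_equal_extract_latest_turn : Prop := ∀ (conversation : List (String × List (List (String × String)))), Dom_extract_latest_turn conversation → Spec_extract_latest_turn conversation (extract_latest_turn conversation)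

-- ===== LEMMAS AND PROOFS =====

-- B's per-role search, taken over an already-reversed list (find? in order)
def pvFind (l : List (List (String × String))) (role : String) : String :=
  match l.find? (fun m =>
      (PySem.Dict.mk m).get? "role" == some role && !((PySem.Dict.mk m).getD "content" "" == "")) with
  | some m => (PySem.Dict.mk m).getD "content" ""
  | none => ""

def pvPred (role : String) (m : List (String × String)) : Bool :=
  (PySem.Dict.mk m).get? "role" == some role && !((PySem.Dict.mk m).getD "content" "" == "")

theorem pvFind_cons_pos (msg : List (String × String)) (rest : List (List (String × String)))
    (role : String) (h : pvPred role msg = true) :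
    pvFind (msg :: rest) role = (PySem.Dict.mk msg).getD "content" "" := by
  simp only [pvFind, pvPred] at *
  simp [h]

theorem pvFind_cons_neg (msg : List (String × String)) (rest : List (List (String × String)))
    (role : String) (h : pvPred role msg = false) :
    pvFind (msg :: rest) role = pvFind rest role := by
  simp only [pvFind, pvPred] at *
  simp [h]

theorem pvLoopA_eq (l : List (List (String × String))) :
    ∀ u a : String, pvLoopA l u a =
      ((if u = "" then pvFind l "user" else u), (if a = "" then pvFind l "assistant" else a)) := by
  induction l with
  | nil => intro u a; simp [pvLoopA, pvFind]
  | cons msg rest ih =>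
    intro u a
    by_cases hr : (PySem.Dict.mk msg).get? "role" = some "assistant"
    · have hrU : ((PySem.Dict.mk msg).get? "role" == some "user") = false := by simp [hr]
      have hfU : pvFind (msg :: rest) "user" = pvFind rest "user" :=
        pvFind_cons_neg _ _ _ (by simp [pvPred, hrU])
      by_cases ha : a = ""
      · by_cases hc : (PySem.Dict.mk msg).getD "content" "" = ""
        · have hfA : pvFind (msg :: rest) "assistant" = pvFind rest "assistant" :=
            pvFind_cons_neg _ _ _ (by simp [pvPred, hc])
          by_cases hu : u = "" <;>
            simp [pvLoopA, hr, ha, hc, hu, ih, hfU, hfA]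
        · have hfA : pvFind (msg :: rest) "assistant" = (PySem.Dict.mk msg).getD "content" "" :=
            pvFind_cons_pos _ _ _ (by simp [pvPred, hr, hc])
          by_cases hu : u = "" <;>
            simp [pvLoopA, hr, ha, hc, hu, ih, hfU, hfA]
      · by_cases hu : u = "" <;>
          simp [pvLoopA, hr, ha, hu, ih, hfU]
    · have hrA : ((PySem.Dict.mk msg).get? "role" == some "assistant") = false := by simp [hr]
      have hfA : pvFind (msg :: rest) "assistant" = pvFind rest "assistant" :=
        pvFind_cons_neg _ _ _ (by simp [pvPred, hrA])
      by_cases hr2 : (PySem.Dict.mk msg).get? "role" = some "user"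
      · by_cases hu : u = ""
        · by_cases hc : (PySem.Dict.mk msg).getD "content" "" = ""
          · have hfU : pvFind (msg :: rest) "user" = pvFind rest "user" :=
              pvFind_cons_neg _ _ _ (by simp [pvPred, hc])
            by_cases ha : a = "" <;>
              simp [pvLoopA, hr2, hu, ha, hc, ih, hfU, hfA]
          · have hfU : pvFind (msg :: rest) "user" = (PySem.Dict.mk msg).getD "content" "" :=
              pvFind_cons_pos _ _ _ (by simp [pvPred, hr2, hc])
            by_cases ha : a = "" <;>
              simp [pvLoopA, hr2, hu, ha, hc, ih, hfU, hfA]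
        · by_cases ha : a = "" <;>
            simp [pvLoopA, hr2, hu, ha, ih, hfA]
      · have hrU : ((PySem.Dict.mk msg).get? "role" == some "user") = false := by simp [hr2]
        have hfU : pvFind (msg :: rest) "user" = pvFind rest "user" :=
          pvFind_cons_neg _ _ _ (by simp [pvPred, hrU])
        by_cases hu : u = "" <;> by_cases ha : a = "" <;>
          simp [pvLoopA, hrA, hrU, hu, ha, ih, hfU, hfA]

-- ===== VERDICT (by name: the statement is the Claim_ definition above) =====
theorem extract_latest_turn_spec : Claim_equal_extract_latest_turn := by
  intro conversation _
  show _ = _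
  simp only [extract_latest_turn, extract_latest_turn_alt, pvLatest]
  rw [pvLoopA_eq]
  simp [pvFind]
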